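-- pv_equiv track=rewrite | github.com/rsmal-ipl/LMER-FE-py-v02 | StructuralBasedFeatures/MainStructuralBasedFeatures.py | extract_chorus
-- ===== SOURCE A (Python) =====
-- def extract_chorus(lyrics):
--     if isinstance(lyrics, str): # verificar se o parâmetro é uma string
--         lines = lyrics.split("\n") # separar as linhas da letra
--         chorus_lines = [] # inicializar a lista
--         in_chorus = False # inicializar a variável
--
--         for line in lines: # percorrer as linhas da letra
--             line = line.strip() # remover espaços em branco do início e fim da linha
--
--             if line.startswith("[Chorus"): # verificar se a linha começa com [Chorus
--                 in_chorus = True # atualizar a variável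
--                 continue
--             elif line.startswith("["): # verificar se a linha começa com [
--                 in_chorus = False # atualizar a variável
--                 continue  # passar para a próxima linha
--
--             if in_chorus and line: # verificar se a variável é verdadeira e se a linha não está vazia
--                 chorus_lines.append(line) # adicionar a linha à lista
--
--         chorus = "\n".join(chorus_lines) # juntar as linhas da lista numa string
--         return chorus # retornar a string
--     else:
--         return None
-- ===== SOURCE B (Python) =====
-- def extract_chorus(lyrics):
--     if not isinstance(lyrics, str):
--         return None
--     # Pass 1: split the lyrics into sections, each a (header, body_lines) pair;
--     # a new section starts at every stripped line beginning with '['.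
--     sections = []
--     header, body = "", []
--     for line in lyrics.split("\n"):
--         line = line.strip()
--         if line.startswith("["):
--             sections.append((header, body))
--             header, body = line, []
--         else:
--             body.append(line)
--     sections.append((header, body))
--     # Pass 2: keep the non-empty body lines of every chorus section.
--     out = []
--     for h, b in sections:
--         if h.startswith("[Chorus"):
--             out.extend(l for l in b if l)
--     return "\n".join(out)
-- ===== Notes on version B (the rewrite author's own statement) =====
-- stated objective: alternative
-- what changed: Replaces the in_chorus flag state machine with a two-pass decomposition: first group the lines into (header, body) sections at every bracket-headed line, then collect the non-empty body lines of the chorus-headed sections.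
import Mathlib
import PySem

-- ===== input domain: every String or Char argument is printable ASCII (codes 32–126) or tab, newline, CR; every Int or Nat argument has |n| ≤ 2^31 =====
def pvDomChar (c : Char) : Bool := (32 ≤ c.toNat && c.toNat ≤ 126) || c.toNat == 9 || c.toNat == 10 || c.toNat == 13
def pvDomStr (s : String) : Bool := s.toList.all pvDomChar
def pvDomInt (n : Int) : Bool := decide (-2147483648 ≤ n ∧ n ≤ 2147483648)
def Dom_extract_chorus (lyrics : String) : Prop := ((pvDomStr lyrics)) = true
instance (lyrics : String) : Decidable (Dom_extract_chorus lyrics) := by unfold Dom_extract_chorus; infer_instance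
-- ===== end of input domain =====

-- ===== PORT A =====
-- B replaces A's in_chorus flag state machine by a two-pass section decomposition (alternative decomposition, same cost).
def extract_chorus (lyrics : String) : Option String :=
  let lines := (PySem.Str.split? lyrics "\n").getD []  -- sep "\n" ≠ "", so split? is always some
  let st := lines.foldl (fun (st : Bool × List String) line =>
    let line := PySem.Str.strip line
    if PySem.Str.startswith line "[Chorus" then (true, st.2)
    else if PySem.Str.startswith line "[" then (false, st.2)
    else if st.1 && decide (line ≠ "") then (st.1, st.2 ++ [line]) else st) (false, [])
  some (PySem.Str.join "\n" st.2)

-- ===== PORT B =====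
-- Pass 1 of Source B: group the stripped lines into (header, body) sections.
def chorusSections : List String → String → List String → List (String × List String) → List (String × List String)
  | [], h, b, done => done ++ [(h, b)]
  | l :: ls, h, b, done =>
    let l := PySem.Str.strip l
    if PySem.Str.startswith l "[" then chorusSections ls l [] (done ++ [(h, b)])
    else chorusSections ls h (b ++ [l]) done

def extract_chorus_alt (lyrics : String) : Option String :=
  let secs := chorusSections ((PySem.Str.split? lyrics "\n").getD []) "" [] []
  let out := secs.foldl (fun acc (s : String × List String) =>
    if PySem.Str.startswith s.1 "[Chorus" then acc ++ s.2.filter (fun l => decide (l ≠ "")) else acc) []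
  some (PySem.Str.join "\n" out)

-- ===== PRECONDITION & SPEC =====
def Spec_extract_chorus (lyrics : String) (out : Option String) : Prop := out = extract_chorus_alt lyrics
instance (lyrics : String) (out : Option String) : Decidable (Spec_extract_chorus lyrics out) := by unfold Spec_extract_chorus; infer_instance

-- ===== CLAIM (what is proved, stated in full; the proofs are below) =====
def Claim_equal_extract_chorus : Prop := ∀ (lyrics : String), Dom_extract_chorus lyrics → Spec_extract_chorus lyrics (extract_chorus lyrics)

-- ===== LEMMAS AND PROOFS =====

-- A's step function, named for the induction
def pvStepA (st : Bool × List String) (line : String) : Bool × List String :=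
  let line := PySem.Str.strip line
  if PySem.Str.startswith line "[Chorus" then (true, st.2)
  else if PySem.Str.startswith line "[" then (false, st.2)
  else if st.1 && decide (line ≠ "") then (st.1, st.2 ++ [line]) else st

-- Pass 2 of B, written as a flatMap over the sections
def pvFlush (secs : List (String × List String)) : List String :=
  secs.flatMap (fun s => if PySem.Str.startswith s.1 "[Chorus" then s.2.filter (fun l => decide (l ≠ "")) else [])

lemma pvFlush_append (xs ys : List (String × List String)) :
    pvFlush (xs ++ ys) = pvFlush xs ++ pvFlush ys := by
  simp [pvFlush]

lemma pvStartsChorus_imp (l : String) (h : PySem.Str.startswith l "[Chorus" = true) :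
    PySem.Str.startswith l "[" = true := by
  simp only [PySem.Str.startswith_eq, PySem.Chars.startswith_iff] at h ⊢
  exact List.IsPrefix.trans (by decide) h

lemma pvFoldA_acc (ls : List String) (flag : Bool) (acc : List String) :
    ls.foldl pvStepA (flag, acc) =
      ((ls.foldl pvStepA (flag, [])).1, acc ++ (ls.foldl pvStepA (flag, [])).2) := by
  induction ls generalizing flag acc with
  | nil => simp
  | cons l ls ih =>
    simp only [List.foldl_cons, pvStepA, List.nil_append]
    split
    · rw [ih, ih true []]
    · split
      · rw [ih, ih false []]
      · split
        · rw [ih flag (acc ++ [PySem.Str.strip l]), ih flag [PySem.Str.strip l]]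
          simp
        · rw [ih flag acc, ih flag []]

lemma pvFoldB_eq_pvFlush (secs : List (String × List String)) (acc : List String) :
    secs.foldl (fun acc (s : String × List String) =>
      if PySem.Str.startswith s.1 "[Chorus" then acc ++ s.2.filter (fun l => decide (l ≠ "")) else acc) acc
      = acc ++ pvFlush secs := by
  have h : (fun (acc : List String) (s : String × List String) =>
      if PySem.Str.startswith s.1 "[Chorus" then acc ++ s.2.filter (fun l => decide (l ≠ "")) else acc)
      = fun acc s => acc ++ (if PySem.Str.startswith s.1 "[Chorus" then s.2.filter (fun l => decide (l ≠ "")) else []) := by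
    funext acc s; split <;> simp
  rw [h, PySem.List.foldl_append_eq_flatMap]
  rfl

lemma pvMain (ls : List String) (h : String) (b : List String)
    (done : List (String × List String)) :
    pvFlush (chorusSections ls h b done) =
      pvFlush done ++
        (if PySem.Str.startswith h "[Chorus" then b.filter (fun l => decide (l ≠ "")) else []) ++
        (ls.foldl pvStepA (PySem.Str.startswith h "[Chorus", [])).2 := by
  induction ls generalizing h b done with
  | nil => simp [chorusSections, pvFlush]
  | cons l ls ih =>
    simp only [chorusSections, List.foldl_cons, pvStepA, List.nil_append]
    by_cases hc : PySem.Str.startswith (PySem.Str.strip l) "[Chorus" = true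
    · rw [if_pos (pvStartsChorus_imp _ hc), if_pos hc, ih, pvFlush_append]
      rw [hc]
      simp [pvFlush]
    · have hc' : PySem.Str.startswith (PySem.Str.strip l) "[Chorus" = false := by
        simpa using hc
      rw [if_neg hc]
      by_cases hb : PySem.Str.startswith (PySem.Str.strip l) "[" = true
      · rw [if_pos hb, if_pos hb, ih, pvFlush_append, hc']
        simp [pvFlush]
      · rw [if_neg hb, if_neg hb, ih]
        cases hf : PySem.Str.startswith h "[Chorus" with
        | false => simp
        | true =>
          rw [if_pos rfl, if_pos rfl]
          by_cases he : PySem.Str.strip l = ""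
          · simp [he, List.filter_append]
          · rw [if_pos (by simp [he]), pvFoldA_acc ls true [PySem.Str.strip l]]
            simp [he, List.filter_append]

-- ===== VERDICT (by name: the statement is the Claim_ definition above) =====
theorem extract_chorus_spec : Claim_equal_extract_chorus := by
  intro lyrics _
  unfold Spec_extract_chorus extract_chorus extract_chorus_alt
  simp only []
  rw [pvFoldB_eq_pvFlush, pvMain]
  have hsw : PySem.Str.startswith "" "[Chorus" = false := by decide
  rw [hsw]
  have hA : ((PySem.Str.split? lyrics "\n").getD []).foldl
      (fun (st : Bool × List String) line =>
        let line := PySem.Str.strip line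
        if PySem.Str.startswith line "[Chorus" then (true, st.2)
        else if PySem.Str.startswith line "[" then (false, st.2)
        else if st.1 && decide (line ≠ "") then (st.1, st.2 ++ [line]) else st) (false, []) =
      ((PySem.Str.split? lyrics "\n").getD []).foldl pvStepA (false, []) := rfl
  rw [hA]
  simp [pvFlush]
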